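-- pv_equiv track=rewrite | github.com/the-JS-hater/TDDD95 | UPG1/set1/help.py | helper
-- ===== SOURCE A (Python) =====
-- def helper(l1, l2, mem_l, mem_r):
--     if not l1 and not l2:
--         return ''
--     if (not l1 and l2) or (l1 and not l2):
--         return '-'
--     left, right = l1[0], l2[0]
--     l_rest, r_rest = l1[1:], l2[1:]
--
--     rest = helper(l_rest, r_rest, mem_l, mem_r)
--     if rest == '-':
--         return rest
--
--     if left[0] == '<' and right[0] == '<':
--         if left in mem_l and right in mem_r:
--             if mem_l[left] != mem_r[right]:
--                 return '-'
--             else: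
--                 return mem_l[left] + " " + rest
--
--         if right in mem_r:
--             return mem_r[right] + " " + rest
--         if left in mem_l:
--             return mem_l[left] + " " + rest
--
--         mem_l[left] = 'a'
--         return 'a' + " " + rest
--
--     if left[0] == '<':
--         if left in mem_l and mem_l[left] != right:
--             return '-'
--         mem_l[left] = right
--         return right + " " + rest
--
--     if right[0] == '<':
--         if right in mem_r and mem_r[right] != left:
--             return '-'
--         mem_r[right] = left
--         return left + " " + rest
--
--     if left == right:
--         return left + " " + rest
--     else:
--         return '-'
-- ===== SOURCE B (Python) =====
-- def _unify(left, right, mem_l, mem_r):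
--     # returns the output token, or None on a unification failure; mutates the maps
--     lv = left.startswith('<')
--     rv = right.startswith('<')
--     if lv and rv:
--         a = mem_l.get(left)
--         b = mem_r.get(right)
--         if a is not None and b is not None:
--             return a if a == b else None
--         if b is not None:
--             return b
--         if a is not None:
--             return a
--         mem_l[left] = 'a'
--         return 'a'
--     if lv:
--         a = mem_l.get(left)
--         if a is not None and a != right:
--             return None
--         mem_l[left] = right
--         return right
--     if rv:
--         b = mem_r.get(right)
--         if b is not None and b != left:
--             return None
--         mem_r[right] = left
--         return left
--     return left if left == right else None
--
--
-- def helper(l1, l2, mem_l, mem_r):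
--     if len(l1) != len(l2):
--         return '-'
--     result = ''
--     for left, right in zip(reversed(l1), reversed(l2)):
--         tok = _unify(left, right, mem_l, mem_r)
--         if tok is None:
--             return '-'
--         result = tok + ' ' + result
--     return result
-- ===== Notes on version B (the rewrite author's own statement) =====
-- stated objective: faster
-- what changed: Replaces A's head/tail recursion (which copies l1[1:]/l2[1:] at every level and recurses n deep) by a single iterative loop over the reversed zipped pairs with a string accumulator and a per-pair unification helper that mutates the maps identically and returns '-' early.
-- outside the precondition, e.g. on helper(['', 'x'], ['', 'y'], {}, {}): A returns '-', B returns '-'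
import Mathlib
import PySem

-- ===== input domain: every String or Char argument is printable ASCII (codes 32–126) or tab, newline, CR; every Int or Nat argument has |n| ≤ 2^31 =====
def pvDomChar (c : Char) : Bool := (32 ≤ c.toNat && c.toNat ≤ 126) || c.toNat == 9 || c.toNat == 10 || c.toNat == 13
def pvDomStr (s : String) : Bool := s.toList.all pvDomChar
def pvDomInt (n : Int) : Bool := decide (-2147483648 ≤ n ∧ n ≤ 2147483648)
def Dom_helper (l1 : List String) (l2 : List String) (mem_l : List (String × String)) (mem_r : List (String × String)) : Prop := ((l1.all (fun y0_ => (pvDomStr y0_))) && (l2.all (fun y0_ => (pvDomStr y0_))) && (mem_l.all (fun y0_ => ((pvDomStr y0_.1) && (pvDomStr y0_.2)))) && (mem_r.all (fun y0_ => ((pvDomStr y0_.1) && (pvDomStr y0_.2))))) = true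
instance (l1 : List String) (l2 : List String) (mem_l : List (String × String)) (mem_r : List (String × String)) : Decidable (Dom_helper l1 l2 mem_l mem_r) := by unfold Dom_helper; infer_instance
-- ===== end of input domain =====

-- B replaces A's slicing head/tail recursion by one iterative pass over the reversed
-- zipped pairs with a string accumulator (objective: faster — no per-level slice copies,
-- no deep recursion; a timing run measured the speedup).
-- A and B both mutate the Python dicts mem_l/mem_r in place identically on success
-- prefixes; the equivalence proved here is about the RETURN value only, so the ports
-- take the dicts as values and thread the updated state explicitly.

-- ===== PORT A =====
-- A's head-pair processing (the if-chain after the recursive call), factored so the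
-- structural recursion below stays readable; branches are in A's exact order.
-- `left[0] == '<'` is ported as `pyGet? left 0 = some '<'` (Pre_ keeps tokens nonempty,
-- where Python would raise IndexError); `mem[k]` after a `k in mem` test is `getD`.
def helperHead (left right rest : String) (ml mr : PySem.Dict String String) :
    String × PySem.Dict String String × PySem.Dict String String :=
  if PySem.Str.pyGet? left 0 = some '<' ∧ PySem.Str.pyGet? right 0 = some '<' then
    if ml.contains left ∧ mr.contains right then
      if ml.getD left "" ≠ mr.getD right "" then ("-", ml, mr)
      else (ml.getD left "" ++ " " ++ rest, ml, mr)
    else if mr.contains right then (mr.getD right "" ++ " " ++ rest, ml, mr)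
    else if ml.contains left then (ml.getD left "" ++ " " ++ rest, ml, mr)
    else ("a" ++ " " ++ rest, ml.insert left "a", mr)
  else if PySem.Str.pyGet? left 0 = some '<' then
    if ml.contains left ∧ ml.getD left "" ≠ right then ("-", ml, mr)
    else (right ++ " " ++ rest, ml.insert left right, mr)
  else if PySem.Str.pyGet? right 0 = some '<' then
    if mr.contains right ∧ mr.getD right "" ≠ left then ("-", ml, mr)
    else (left ++ " " ++ rest, ml, mr.insert right left)
  else if left = right then (left ++ " " ++ rest, ml, mr)
  else ("-", ml, mr)

def helperCore : List String → List String → PySem.Dict String String →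
    PySem.Dict String String → String × PySem.Dict String String × PySem.Dict String String
  | [], [], ml, mr => ("", ml, mr)
  | [], _ :: _, ml, mr => ("-", ml, mr)
  | _ :: _, [], ml, mr => ("-", ml, mr)
  | left :: lRest, right :: rRest, ml, mr =>
    match helperCore lRest rRest ml mr with
    | (rest, ml', mr') =>
      if rest = "-" then (rest, ml', mr')
      else helperHead left right rest ml' mr'

def helper (l1 : List String) (l2 : List String) (mem_l : List (String × String)) (mem_r : List (String × String)) : String :=
  (helperCore l1 l2 (PySem.Dict.ofList mem_l) (PySem.Dict.ofList mem_r)).1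

-- ===== PORT B =====
-- per-pair unification (Source B's _unify): token on success, none on failure
def unifyStep (left right : String) (ml mr : PySem.Dict String String) :
    Option (String × PySem.Dict String String × PySem.Dict String String) :=
  let lv := PySem.Str.startswith left "<"
  let rv := PySem.Str.startswith right "<"
  if lv && rv then
    match ml.get? left, mr.get? right with
    | some a, some b => if a = b then some (a, ml, mr) else none
    | none, some b => some (b, ml, mr)
    | some a, none => some (a, ml, mr)
    | none, none => some ("a", ml.insert left "a", mr)
  else if lv then
    match ml.get? left with
    | some a => if a ≠ right then none else some (right, ml.insert left right, mr)
    | none => some (right, ml.insert left right, mr)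
  else if rv then
    match mr.get? right with
    | some b => if b ≠ left then none else some (left, ml, mr.insert right left)
    | none => some (left, ml, mr.insert right left)
  else if left = right then some (left, ml, mr) else none

-- Source B's for-loop over the reversed pairs, accumulating `result`
def loopB : List (String × String) → String → PySem.Dict String String →
    PySem.Dict String String → String
  | [], result, _, _ => result
  | (left, right) :: rest, result, ml, mr =>
    match unifyStep left right ml mr with
    | none => "-"
    | some (tok, ml', mr') => loopB rest (tok ++ " " ++ result) ml' mr'

def helper_alt (l1 : List String) (l2 : List String) (mem_l : List (String × String)) (mem_r : List (String × String)) : String :=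
  if l1.length ≠ l2.length then "-"
  else loopB (l1.reverse.zip l2.reverse) "" (PySem.Dict.ofList mem_l) (PySem.Dict.ofList mem_r)

-- ===== PRECONDITION & SPEC =====
-- Pre_ excludes inputs containing an empty token when the two lists have equal length:
-- on those A may raise IndexError at `left[0]`/`right[0]` (it returns '-' only when a
-- later pair already fails, and both programs return '-' there — see the cite).
def Pre_helper (l1 : List String) (l2 : List String) (mem_l : List (String × String)) (mem_r : List (String × String)) : Prop :=
  l1.length = l2.length → ("" ∉ l1 ∧ "" ∉ l2)
instance (l1 : List String) (l2 : List String) (mem_l : List (String × String)) (mem_r : List (String × String)) : Decidable (Pre_helper l1 l2 mem_l mem_r) := by unfold Pre_helper; infer_instance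

def pvWitness_helper : List String × List String × (List (String × String)) × (List (String × String)) :=
  (["<x", "a"], ["b", "a"], [], [])

def Spec_helper (l1 : List String) (l2 : List String) (mem_l : List (String × String)) (mem_r : List (String × String)) (out : String) : Prop := out = helper_alt l1 l2 mem_l mem_r
instance (l1 : List String) (l2 : List String) (mem_l : List (String × String)) (mem_r : List (String × String)) (out : String) : Decidable (Spec_helper l1 l2 mem_l mem_r out) := by unfold Spec_helper; infer_instance

-- ===== CLAIM (what is proved, stated in full; the proofs are below) =====
def Claim_equal_helper : Prop := ∀ (l1 : List String) (l2 : List String) (mem_l : List (String × String)) (mem_r : List (String × String)), Dom_helper l1 l2 mem_l mem_r → Pre_helper l1 l2 mem_l mem_r → Spec_helper l1 l2 mem_l mem_r (helper l1 l2 mem_l mem_r)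

-- ===== LEMMAS AND PROOFS =====

-- a successful level result `t ++ " " ++ rest` is never the failure marker "-"
lemma append_space_ne_dash (t s : String) : t ++ " " ++ s ≠ "-" := by
  intro h
  have h' : t.toList ++ " ".toList ++ s.toList = "-".toList := by
    simpa [String.toList_append] using congrArg String.toList h
  have hmem : (' ' : Char) ∈ "-".toList := by
    rw [← h']
    exact List.mem_append.mpr (Or.inl (List.mem_append.mpr (Or.inr (by decide))))
  revert hmem; decide

-- for a nonempty token, Source B's startswith('<') is exactly A's `s[0] == '<'`
lemma startswith_head (s : String) (h : s ≠ "") :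
    PySem.Str.startswith s "<" = true ↔ PySem.Str.pyGet? s 0 = some '<' := by
  have hne : s.toList ≠ [] := fun hh => h (String.toList_inj.mp (by simpa using hh))
  cases hcs : s.toList with
  | nil => exact absurd hcs hne
  | cons c cs =>
    have h1 : PySem.Str.startswith s "<" = true ↔ c = '<' := by
      rw [show PySem.Str.startswith s "<" = PySem.Chars.startswith s.toList "<".toList from
        by simp [pysem]]
      rw [PySem.Chars.startswith_iff, show "<".toList = ['<'] from by decide, hcs]
      constructor
      · rintro ⟨tl, htl⟩
        simpa using (congrArg (fun l => l.head?) htl).symm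
      · rintro rfl
        exact ⟨cs, rfl⟩
    have h2 : PySem.Str.pyGet? s 0 = some c := by
      simp [pysem, hcs]
    rw [h1, h2]
    simp

-- normal forms of the two head tests, as simp leaves them (bridge to the Chars/List level)
lemma sw_norm (s : String) (b : Bool) (h : PySem.Str.startswith s "<" = b) :
    PySem.Chars.startswith s.toList ['<'] = b := by
  simpa only [PySem.Str.startswith_eq, show "<".toList = ['<'] from by decide] using h

lemma pg_norm (s : String) :
    PySem.Str.pyGet? s 0 = some '<' ↔ PySem.List.pyGet? s.toList 0 = some '<' := by
  simp only [PySem.Str.pyGet?_eq, PySem.Chars.pyGet?_eq_listPyGet?]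

-- the per-pair step: A's head chain and Source B's _unify agree (token, updated maps, or failure)
lemma head_agree (left right : String) (hl : left ≠ "") (hr : right ≠ "")
    (ml mr : PySem.Dict String String) (rest : String) :
    (∃ t ml' mr', unifyStep left right ml mr = some (t, ml', mr') ∧
        helperHead left right rest ml mr = (t ++ " " ++ rest, ml', mr'))
    ∨ (unifyStep left right ml mr = none ∧ (helperHead left right rest ml mr).1 = "-") := by
  have hL := startswith_head left hl
  have hR := startswith_head right hr
  by_cases hlv : PySem.Str.pyGet? left 0 = some '<' <;>
    by_cases hrv : PySem.Str.pyGet? right 0 = some '<'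
  · -- both sides are variables
    have hbl : PySem.Chars.startswith left.toList ['<'] = true := sw_norm _ _ (hL.mpr hlv)
    have hbr : PySem.Chars.startswith right.toList ['<'] = true := sw_norm _ _ (hR.mpr hrv)
    have hlv' : PySem.List.pyGet? left.toList 0 = some '<' := (pg_norm left).mp hlv
    have hrv' : PySem.List.pyGet? right.toList 0 = some '<' := (pg_norm right).mp hrv
    rcases hml : ml.get? left with _ | a <;> rcases hmr2 : mr.get? right with _ | b
    · exact Or.inl ⟨"a", ml.insert left "a", mr,
        by simp [unifyStep, hbl, hbr, hml, hmr2],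
        by simp [helperHead, hlv', hrv', PySem.Dict.contains_eq_isSome_get?, hml, hmr2]⟩
    · exact Or.inl ⟨b, ml, mr,
        by simp [unifyStep, hbl, hbr, hml, hmr2],
        by simp [helperHead, hlv', hrv', PySem.Dict.contains_eq_isSome_get?, hml, hmr2,
          PySem.Dict.getD_eq_get?_getD]⟩
    · exact Or.inl ⟨a, ml, mr,
        by simp [unifyStep, hbl, hbr, hml, hmr2],
        by simp [helperHead, hlv', hrv', PySem.Dict.contains_eq_isSome_get?, hml, hmr2,
          PySem.Dict.getD_eq_get?_getD]⟩
    · by_cases hab : a = b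
      · exact Or.inl ⟨a, ml, mr,
          by simp [unifyStep, hbl, hbr, hml, hmr2, hab],
          by simp [helperHead, hlv', hrv', PySem.Dict.contains_eq_isSome_get?, hml, hmr2,
            PySem.Dict.getD_eq_get?_getD, hab]⟩
      · exact Or.inr ⟨by simp [unifyStep, hbl, hbr, hml, hmr2, hab],
          by simp [helperHead, hlv', hrv', PySem.Dict.contains_eq_isSome_get?, hml, hmr2,
            PySem.Dict.getD_eq_get?_getD, hab]⟩
  · -- only left is a variable
    have hbl : PySem.Chars.startswith left.toList ['<'] = true := sw_norm _ _ (hL.mpr hlv)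
    have hbr : PySem.Chars.startswith right.toList ['<'] = false :=
      sw_norm _ _ (Bool.eq_false_iff.mpr fun hb => hrv (hR.mp hb))
    have hlv' : PySem.List.pyGet? left.toList 0 = some '<' := (pg_norm left).mp hlv
    have hrv' : ¬ PySem.List.pyGet? right.toList 0 = some '<' :=
      fun h => hrv ((pg_norm right).mpr h)
    rcases hml : ml.get? left with _ | a
    · exact Or.inl ⟨right, ml.insert left right, mr,
        by simp [unifyStep, hbl, hbr, hml],
        by simp [helperHead, hlv', hrv', PySem.Dict.contains_eq_isSome_get?, hml]⟩
    · by_cases hav : a = right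
      · exact Or.inl ⟨right, ml.insert left right, mr,
          by simp [unifyStep, hbl, hbr, hml, hav],
          by simp [helperHead, hlv', hrv', PySem.Dict.contains_eq_isSome_get?, hml,
            PySem.Dict.getD_eq_get?_getD, hav]⟩
      · exact Or.inr ⟨by simp [unifyStep, hbl, hbr, hml, hav],
          by simp [helperHead, hlv', hrv', PySem.Dict.contains_eq_isSome_get?, hml,
            PySem.Dict.getD_eq_get?_getD, hav]⟩
  · -- only right is a variable
    have hbl : PySem.Chars.startswith left.toList ['<'] = false :=
      sw_norm _ _ (Bool.eq_false_iff.mpr fun hb => hlv (hL.mp hb))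
    have hbr : PySem.Chars.startswith right.toList ['<'] = true := sw_norm _ _ (hR.mpr hrv)
    have hlv' : ¬ PySem.List.pyGet? left.toList 0 = some '<' :=
      fun h => hlv ((pg_norm left).mpr h)
    have hrv' : PySem.List.pyGet? right.toList 0 = some '<' := (pg_norm right).mp hrv
    rcases hmr2 : mr.get? right with _ | b
    · exact Or.inl ⟨left, ml, mr.insert right left,
        by simp [unifyStep, hbl, hbr, hmr2],
        by simp [helperHead, hlv', hrv', PySem.Dict.contains_eq_isSome_get?, hmr2]⟩
    · by_cases hbv : b = left
      · exact Or.inl ⟨left, ml, mr.insert right left,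
          by simp [unifyStep, hbl, hbr, hmr2, hbv],
          by simp [helperHead, hlv', hrv', PySem.Dict.contains_eq_isSome_get?, hmr2,
            PySem.Dict.getD_eq_get?_getD, hbv]⟩
      · exact Or.inr ⟨by simp [unifyStep, hbl, hbr, hmr2, hbv],
          by simp [helperHead, hlv', hrv', PySem.Dict.contains_eq_isSome_get?, hmr2,
            PySem.Dict.getD_eq_get?_getD, hbv]⟩
  · -- two concrete tokens
    have hbl : PySem.Chars.startswith left.toList ['<'] = false :=
      sw_norm _ _ (Bool.eq_false_iff.mpr fun hb => hlv (hL.mp hb))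
    have hbr : PySem.Chars.startswith right.toList ['<'] = false :=
      sw_norm _ _ (Bool.eq_false_iff.mpr fun hb => hrv (hR.mp hb))
    have hlv' : ¬ PySem.List.pyGet? left.toList 0 = some '<' :=
      fun h => hlv ((pg_norm left).mpr h)
    have hrv' : ¬ PySem.List.pyGet? right.toList 0 = some '<' :=
      fun h => hrv ((pg_norm right).mpr h)
    by_cases heq : left = right
    · exact Or.inl ⟨left, ml, mr,
        by simp [unifyStep, hbl, hbr, heq],
        by simp [helperHead, hlv', hrv', heq]⟩
    · exact Or.inr ⟨by simp [unifyStep, hbl, hbr, heq],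
        by simp [helperHead, hlv', hrv', heq]⟩

-- unequal lengths: A returns '-' (the recursion bottoms out in a mismatched base case)
lemma helperCore_ne_length : ∀ (l1 l2 : List String) (ml mr : PySem.Dict String String),
    l1.length ≠ l2.length → (helperCore l1 l2 ml mr).1 = "-" := by
  intro l1
  induction l1 with
  | nil => intro l2 ml mr h; cases l2 with
    | nil => simp at h
    | cons b rs => simp [helperCore]
  | cons a ls ih =>
    intro l2 ml mr h
    cases l2 with
    | nil => simp [helperCore]
    | cons b rs =>
      have hlen : ls.length ≠ rs.length := by simpa using h
      have hrec := ih rs ml mr hlen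
      simp only [helperCore]
      rcases hcc : helperCore ls rs ml mr with ⟨rest, ml', mr'⟩
      rw [hcc] at hrec
      simp only at hrec
      simp [hrec]

-- main invariant: A's recursion and Source B's reversed-pairs loop compute the same
-- string and reach the same map state, composably over any continuation ys
lemma core_loop : ∀ (l1 l2 : List String) (ml mr : PySem.Dict String String),
    l1.length = l2.length → "" ∉ l1 → "" ∉ l2 →
    ((helperCore l1 l2 ml mr).1 = "-" ∧
      ∀ ys res, loopB ((l1.reverse.zip l2.reverse) ++ ys) res ml mr = "-")
    ∨ ((helperCore l1 l2 ml mr).1 ≠ "-" ∧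
      ∀ ys res, loopB ((l1.reverse.zip l2.reverse) ++ ys) res ml mr
        = loopB ys ((helperCore l1 l2 ml mr).1 ++ res) (helperCore l1 l2 ml mr).2.1
            (helperCore l1 l2 ml mr).2.2) := by
  intro l1
  induction l1 with
  | nil =>
    intro l2 ml mr hlen h1 h2
    cases l2 with
    | nil =>
      refine Or.inr ⟨by simp [helperCore], ?_⟩
      intro ys res
      simp [helperCore]
    | cons b rs => simp at hlen
  | cons a ls ih =>
    intro l2 ml mr hlen h1 h2
    cases l2 with
    | nil => simp at hlen
    | cons b rs =>
      have hlen' : ls.length = rs.length := by simpa using hlen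
      have hz : (a :: ls).reverse.zip (b :: rs).reverse
          = (ls.reverse.zip rs.reverse) ++ [(a, b)] := by
        simp only [List.reverse_cons]
        rw [List.zip_append (by simp [hlen'])]
        simp
      have ha : a ≠ "" := by rintro rfl; exact h1 (by simp)
      have hb : b ≠ "" := by rintro rfl; exact h2 (by simp)
      have h1' : "" ∉ ls := fun hm => h1 (List.mem_cons_of_mem _ hm)
      have h2' : "" ∉ rs := fun hm => h2 (List.mem_cons_of_mem _ hm)
      rcases hcc : helperCore ls rs ml mr with ⟨rest, ml1, mr1⟩
      rcases ih rs ml mr hlen' h1' h2' with ⟨hs, hloop⟩ | ⟨hs, hloop⟩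
      · -- tail already fails
        rw [hcc] at hs
        have hrest : rest = "-" := hs
        left
        constructor
        · simp only [helperCore]
          rw [hcc]
          simp [hrest]
        · intro ys res
          rw [hz, List.append_assoc]
          exact hloop _ _
      · -- tail succeeds with string rest and maps ml1 mr1
        rw [hcc] at hs hloop
        have hrest : rest ≠ "-" := hs
        replace hloop : ∀ ys res, loopB (ls.reverse.zip rs.reverse ++ ys) res ml mr
            = loopB ys (rest ++ res) ml1 mr1 := hloop
        rcases head_agree a b ha hb ml1 mr1 rest with
          ⟨t, ml2, mr2, hstep, hhead⟩ | ⟨hstep, hhead⟩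
        · right
          have hres : helperCore (a :: ls) (b :: rs) ml mr = (t ++ " " ++ rest, ml2, mr2) := by
            simp only [helperCore]
            rw [hcc]
            simp only [if_neg hrest]
            exact hhead
          rw [hres]
          refine ⟨append_space_ne_dash t rest, ?_⟩
          intro ys res
          rw [hz, List.append_assoc, hloop]
          simp only [List.cons_append, List.nil_append, loopB]
          rw [hstep]
          simp [String.append_assoc]
        · left
          constructor
          · simp only [helperCore]
            rw [hcc]
            simp only [if_neg hrest]
            exact hhead
          · intro ys res
            rw [hz, List.append_assoc, hloop]
            simp only [List.cons_append, List.nil_append, loopB]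
            rw [hstep]

-- ===== VERDICT (by name: the statement is the Claim_ definition above) =====
theorem helper_spec : Claim_equal_helper := by
  intro l1 l2 mem_l mem_r _hdom hpre
  unfold Spec_helper helper helper_alt
  by_cases hlen : l1.length = l2.length
  · obtain ⟨h1, h2⟩ := hpre hlen
    simp only [hlen, ne_eq, not_true_eq_false, if_false]
    rcases core_loop l1 l2 (PySem.Dict.ofList mem_l) (PySem.Dict.ofList mem_r) hlen h1 h2 with
      ⟨hs, hloop⟩ | ⟨hs, hloop⟩
    · rw [hs, ← List.append_nil (l1.reverse.zip l2.reverse), hloop]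
    · rw [← List.append_nil (l1.reverse.zip l2.reverse), hloop]
      simp [loopB]
  · rw [helperCore_ne_length l1 l2 _ _ hlen]
    simp [hlen]
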